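-- pv_equiv track=rewrite | github.com/EthanJns/GrammaticalAnalysis | src/main/ml/PosTokenizer.py | get_vocab_size_max_len
-- ===== SOURCE A (Python) =====
-- def get_vocab_size_max_len(sentences):
--     max_size = 0
--     word_set = set()
--     for sentence in sentences:
--         sentence_as_list = sentence.split(' ')
--         max_size = len(sentence_as_list) if len(sentence_as_list) > max_size else max_size
--         word_set.update(sentence_as_list)
--
--     return len(word_set), max_size
-- ===== SOURCE B (Python) =====
-- def get_vocab_size_max_len(sentences):
--     if not sentences:
--         return 0, 0
--     # longest sentence: len(s.split(' ')) == s.count(' ') + 1, so no splitting needed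
--     max_size = max(s.count(' ') for s in sentences) + 1
--     # vocabulary: sort all tokens, then count boundaries between distinct runs
--     tokens = sorted(w for s in sentences for w in s.split(' '))
--     vocab = 0
--     prev = None
--     for w in tokens:
--         if w != prev:
--             vocab += 1
--         prev = w
--     return vocab, max_size
-- ===== Notes on version B (the rewrite author's own statement) =====
-- stated objective: alternative
-- what changed: A's fused loop over sentences (running max of split lengths + a growing hash set) is replaced by a closed form for the max (len(s.split(' ')) == s.count(' ')+1, so no splitting for the max pass) and a sort-then-scan distinct count for the vocabulary (sort all tokens, count run boundaries) instead of a set.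
import Mathlib
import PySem

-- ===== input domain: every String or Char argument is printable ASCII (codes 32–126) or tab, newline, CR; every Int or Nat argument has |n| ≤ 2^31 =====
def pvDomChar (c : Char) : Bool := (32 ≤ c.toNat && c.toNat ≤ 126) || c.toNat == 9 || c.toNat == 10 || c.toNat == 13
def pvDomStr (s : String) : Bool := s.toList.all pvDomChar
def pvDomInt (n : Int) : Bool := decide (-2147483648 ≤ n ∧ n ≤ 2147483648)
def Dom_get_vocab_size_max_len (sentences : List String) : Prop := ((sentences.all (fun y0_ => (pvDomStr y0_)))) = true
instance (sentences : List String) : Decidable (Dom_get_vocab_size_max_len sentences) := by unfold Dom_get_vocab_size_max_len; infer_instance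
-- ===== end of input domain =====

-- B replaces A's fused loop (running max + hash set) by a closed form for the max pass
-- (len(s.split(' ')) = s.count(' ') + 1, so nothing is split there) and a sort-then-scan
-- distinct count (sorted tokens, run boundaries) instead of a set; objective: alternative.

-- shared helper: s.split(' ') with the fixed nonempty separator " " (split? is none only for an empty separator)
def pvSplit (s : String) : List String := (PySem.Str.split? s " ").getD []

-- ===== PORT A =====
def get_vocab_size_max_len (sentences : List String) : Int × Int :=
  let st := sentences.foldl
    (fun (st : Int × PySem.Set String) sentence =>
      let sentence_as_list := pvSplit sentence
      (if (sentence_as_list.length : Int) > st.1 then (sentence_as_list.length : Int) else st.1,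
       PySem.Set.update st.2 sentence_as_list))
    (0, PySem.Set.empty)
  (PySem.Set.len st.2, st.1)

-- ===== PORT B =====
-- the body of Source B's 'for w in tokens' loop (vocab, prev are the two state components)
def pvRunStep (st : Int × Option String) (w : String) : Int × Option String :=
  (if some w ≠ st.2 then st.1 + 1 else st.1, some w)

def get_vocab_size_max_len_alt (sentences : List String) : Int × Int :=
  match sentences with
  | [] => (0, 0)
  | _ =>
    let max_size : Int :=
      (PySem.List.max? (sentences.map (fun s => (PySem.Str.count s " " : Int))) (fun y => y)).getD 0 + 1
    let tokens := PySem.List.sorted (sentences.flatMap (fun s => pvSplit s)) (fun w => w) false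
    ((tokens.foldl pvRunStep (0, none)).1, max_size)

-- ===== PRECONDITION & SPEC =====
def Spec_get_vocab_size_max_len (sentences : List String) (out : Int × Int) : Prop := out = get_vocab_size_max_len_alt sentences
instance (sentences : List String) (out : Int × Int) : Decidable (Spec_get_vocab_size_max_len sentences out) := by unfold Spec_get_vocab_size_max_len; infer_instance

-- ===== CLAIM (what is proved, stated in full; the proofs are below) =====
def Claim_equal_get_vocab_size_max_len : Prop := ∀ (sentences : List String), Dom_get_vocab_size_max_len sentences → Spec_get_vocab_size_max_len sentences (get_vocab_size_max_len sentences)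

-- ===== LEMMAS AND PROOFS =====

-- a fold over a pair whose components evolve independently splits into two folds
theorem pv_foldl_pair {α β γ : Type} (l : List γ) (f : α → γ → α) (g : β → γ → β) (a : α) (b : β) :
    l.foldl (fun (p : α × β) x => (f p.1 x, g p.2 x)) (a, b) = (l.foldl f a, l.foldl g b) := by
  induction l generalizing a b with
  | nil => rfl
  | cons x t ih => simpa using ih (f a x) (g b x)

-- the set component of A's fold adds all tokens of the flattened splits, in order
theorem pv_foldl_update (l : List String) (s : PySem.Set String) :
    l.foldl (fun acc x => PySem.Set.update acc (pvSplit x)) s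
      = (l.flatMap pvSplit).foldl PySem.Set.add s := by
  induction l generalizing s with
  | nil => rfl
  | cons x t ih =>
    simp only [List.foldl_cons, List.flatMap_cons, List.foldl_append]
    exact ih _

-- the running-max component of A's fold is a plain fold of max over the lengths
theorem pv_foldl_ifmax (l : List String) (a : Int) :
    l.foldl (fun (m : Int) x => if ((pvSplit x).length : Int) > m then ((pvSplit x).length : Int) else m) a
      = (l.map (fun x => ((pvSplit x).length : Int))).foldl max a := by
  rw [List.foldl_map]
  have h : (fun (m : Int) x => if ((pvSplit x).length : Int) > m then ((pvSplit x).length : Int) else m)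
      = fun (m : Int) x => max m ((pvSplit x).length : Int) := by
    funext m x
    rcases lt_or_ge m ((pvSplit x).length : Int) with h | h
    · simp [h, max_eq_right h.le]
    · simp [not_lt.mpr h, max_eq_left h]
  rw [h]

-- len(s.split(' ')) = s.count(' ') + 1, at the level of the two fueled go loops
theorem pv_go_len (l : List Char) : ∀ (fuel1 fuel2 : Nat) (cur : List Char)
    (acc : List (List Char)) (n : Nat), l.length < fuel1 → l.length ≤ fuel2 →
    (PySem.Chars.splitOn.go [' '] fuel1 l cur acc).length + n
      = acc.length + 1 + PySem.Chars.count.go [' '] fuel2 l n := by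
  induction l with
  | nil =>
    intro fuel1 fuel2 cur acc n _ _
    cases fuel1 <;> cases fuel2 <;>
      simp [PySem.Chars.splitOn.go, PySem.Chars.count.go]
  | cons c rest ih =>
    intro fuel1 fuel2 cur acc n h1 h2
    cases fuel1 with
    | zero => omega
    | succ f1 =>
      cases fuel2 with
      | zero => simp at h2
      | succ f2 =>
        simp only [List.length_cons] at h1 h2
        by_cases hc : c = ' '
        · subst hc
          have hpre : [' '].isPrefixOf (' ' :: rest) = true := by simp [List.isPrefixOf]
          simp only [PySem.Chars.splitOn.go, PySem.Chars.count.go, hpre, if_pos,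
            List.length_cons, List.drop_succ_cons, List.length_nil, List.drop_zero]
          have := ih f1 f2 [] (cur.reverse :: acc) (n + 1) (by omega) (by omega)
          simp only [List.length_cons] at this
          omega
        · have hpre : [' '].isPrefixOf (c :: rest) = false := by
            simp [List.isPrefixOf]; exact fun h => hc h.symm
          simp only [PySem.Chars.splitOn.go, PySem.Chars.count.go, hpre,
            Bool.false_eq_true, if_false]
          exact ih f1 f2 (c :: cur) acc n (by omega) (by omega)

-- len(s.split(' ')) = s.count(' ') + 1
theorem pv_len_split (s : String) : (pvSplit s).length = PySem.Str.count s " " + 1 := by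
  have h := pv_go_len s.toList (s.toList.length + 1) s.toList.length [] [] 0
    (by omega) (le_refl _)
  have ht : (" ").toList = [' '] := rfl
  simp only [pvSplit, PySem.Str.split?, PySem.Chars.split?, PySem.Str.count, PySem.Chars.count,
    PySem.Chars.splitOn, ht, List.isEmpty_cons, Bool.false_eq_true, if_false,
    Option.map_some, Option.getD_some, List.length_map, List.length_nil] at *
  omega

-- fold of max commutes with (+1) on every element
theorem pv_foldl_max_add_one (l : List Int) (a : Int) :
    (l.map (fun x => x + 1)).foldl max (a + 1) = l.foldl max a + 1 := by
  induction l generalizing a with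
  | nil => rfl
  | cons x t ih => simpa [max_add_add_right] using ih (max a x)

-- Source B's boundary-counting loop on a sorted run, started after an element p below everything
theorem pv_cnt_some (t : List String) : ∀ (p : String) (a : Int),
    t.Pairwise (· ≤ ·) → (∀ y ∈ t, p ≤ y) →
    (t.foldl pvRunStep (a, some p)).1 = a + ((t.toFinset.erase p).card : Int) := by
  induction t with
  | nil => intro p a _ _; simp
  | cons x r ih =>
    intro p a hp hle
    rcases List.pairwise_cons.mp hp with ⟨hx, hr⟩
    by_cases hxp : x = p
    · subst hxp
      rw [List.foldl_cons, show pvRunStep (a, some x) x = (a, some x) from by simp [pvRunStep],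
        ih x a hr hx]
      congr 2
      rw [List.toFinset_cons, Finset.erase_insert_eq_erase]
    · have hpx : p ∉ (x :: r) := by
        intro hmem
        rcases List.mem_cons.mp hmem with h | h
        · exact hxp h.symm
        · exact hxp (le_antisymm (hle x List.mem_cons_self) (hx p h)).symm
      rw [List.foldl_cons,
        show pvRunStep (a, some p) x = (a + 1, some x) from by simp [pvRunStep, hxp],
        ih x (a + 1) hr hx]
      have hcard : ((x :: r).toFinset.erase p).card = (r.toFinset.erase x).card + 1 := by
        rw [Finset.erase_eq_of_notMem (by simpa using hpx), List.toFinset_cons]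
        by_cases hxr : x ∈ r.toFinset
        · rw [Finset.insert_eq_self.mpr hxr, ← Finset.card_erase_add_one hxr]
        · rw [Finset.card_insert_of_notMem hxr, Finset.erase_eq_of_notMem hxr]
      rw [hcard]
      push_cast
      ring

-- the boundary-counting loop over a sorted list counts its distinct elements
theorem pv_cnt_top (t : List String) (h : t.Pairwise (· ≤ ·)) :
    (t.foldl pvRunStep (0, none)).1 = (t.toFinset.card : Int) := by
  cases t with
  | nil => simp
  | cons x r =>
    rcases List.pairwise_cons.mp h with ⟨hx, hr⟩
    rw [List.foldl_cons,
      show pvRunStep (0, (none : Option String)) x = (1, some x) from by simp [pvRunStep],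
      pv_cnt_some r x 1 hr hx]
    have hc : (r.toFinset.erase x).card + 1 = (x :: r).toFinset.card := by
      rw [List.toFinset_cons]
      by_cases hxr : x ∈ r.toFinset
      · rw [Finset.insert_eq_self.mpr hxr, Finset.card_erase_add_one hxr]
      · rw [Finset.card_insert_of_notMem hxr, Finset.erase_eq_of_notMem hxr]
    push_cast [← hc]
    ring

-- the length of set(xs) is the number of distinct elements of xs
theorem pv_len_ofList (xs : List String) :
    (PySem.Set.len (PySem.Set.ofList xs) : Int) = (xs.toFinset.card : Int) := by
  have hnd : (PySem.Set.ofList xs).Nodup := PySem.Set.nodup_ofList xs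
  have hfs : (PySem.Set.ofList xs).toFinset = xs.toFinset := by
    ext y; simp [List.mem_toFinset, PySem.Set.mem_ofList]
  rw [show xs.toFinset = (PySem.Set.ofList xs).toFinset from hfs.symm,
    List.toFinset_card_of_nodup hnd]
  rfl

-- ===== VERDICT (by name: the statement is the Claim_ definition above) =====
theorem get_vocab_size_max_len_spec : Claim_equal_get_vocab_size_max_len := by
  intro sentences _
  unfold Spec_get_vocab_size_max_len get_vocab_size_max_len get_vocab_size_max_len_alt
  cases sentences with
  | nil => rfl
  | cons s0 rest =>
    simp only []
    rw [pv_foldl_pair (s0 :: rest)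
          (fun (m : Int) sentence => if ((pvSplit sentence).length : Int) > m then ((pvSplit sentence).length : Int) else m)
          (fun (s : PySem.Set String) sentence => PySem.Set.update s (pvSplit sentence))
          0 PySem.Set.empty]
    refine Prod.ext ?_ ?_ <;> simp only []
    · -- vocabulary size: |set(tokens)| = distinct count of the sorted token list
      have hxs : (s0 :: rest).foldl (fun acc x => PySem.Set.update acc (pvSplit x)) PySem.Set.empty
          = PySem.Set.ofList ((s0 :: rest).flatMap pvSplit) := by
        rw [pv_foldl_update, PySem.Set.ofList_eq_foldl]; rfl
      rw [hxs, pv_len_ofList]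
      have hsorted := PySem.List.sorted_pairwise ((s0 :: rest).flatMap (fun s => pvSplit s)) (fun w => w)
      rw [pv_cnt_top _ hsorted]
      exact congrArg (fun t => ((Finset.card t : Nat) : Int))
        (List.toFinset_eq_of_perm _ _
          (PySem.List.sorted_perm ((s0 :: rest).flatMap (fun s => pvSplit s)) (fun w => w) false)).symm
    · -- max length: running max of split lengths = max of space counts + 1
      rw [pv_foldl_ifmax]
      have hlen : (fun x => ((pvSplit x).length : Int))
          = fun x => (PySem.Str.count x " " : Int) + 1 := by
        funext x
        rw [pv_len_split x]
        push_cast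
        ring
      rw [hlen]
      simp only [List.map_cons]
      rw [PySem.List.max?_id_cons, Option.getD_some]
      have h0 : max (0 : Int) ((PySem.Str.count s0 " " : Int) + 1)
          = (PySem.Str.count s0 " " : Int) + 1 := by
        have : (0 : Int) ≤ (PySem.Str.count s0 " " : Int) := Int.natCast_nonneg _
        omega
      calc ((s0 :: rest).map (fun x => (PySem.Str.count x " " : Int) + 1)).foldl max 0
          = ((rest.map (fun x => (PySem.Str.count x " " : Int))).map (fun x => x + 1)).foldl max
              ((PySem.Str.count s0 " " : Int) + 1) := by
            simp only [List.map_cons, List.foldl_cons, List.map_map, h0]; rfl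
        _ = (rest.map (fun x => (PySem.Str.count x " " : Int))).foldl max (PySem.Str.count s0 " " : Int) + 1 :=
            pv_foldl_max_add_one _ _
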